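-- pv_equiv track=rewrite | github.com/ccpnmr/analysis | python/ccpncore/lib/DataMapper.py | normalisedAtomName
-- ===== SOURCE A (Python) =====
-- def normalisedAtomName(name):
--   """ Get normalized atom name: Upper case, with common offset-indicating
--       suffixes removed
--       COPY from FormatExchange.CcpnUtil
--
--   .. describe:: Input
--
--   atom name (Word)
--
--   .. describe:: Output
--
--   normalisedatom name (Word)
--   """
--
--   stripSuffixes = ('I+1', 'I-1', '+1', '-1', '+', '-', 'I' )
--
--   result = name.upper()
--
--   for ss in stripSuffixes:
--     if result.endswith(ss):
--       result = result[:-len(ss)]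
--       break
--   #
--   return result
-- ===== SOURCE B (Python) =====
-- # state -> {char: (next_state, accepting)} : trie of the REVERSED suffixes
-- # '+','-','I','1+','1-','1+I','1-I'; deepest accepting depth reached = chars to cut.
-- _DELTA = {
--   0: {'+': (1, True), '-': (1, True), 'I': (1, True), '1': (2, False)},
--   1: {},
--   2: {'+': (3, True), '-': (3, True)},
--   3: {'I': (4, True)},
--   4: {},
-- }
--
-- def normalisedAtomName(name):
--   """Uppercase the atom name, then run a table-driven automaton over its
--   REVERSED characters (the trie of reversed offset suffixes), recording the
--   deepest accepting depth; cut that many characters off the end."""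
--   u = name.upper()
--   state, depth, cut = 0, 0, 0
--   for ch in reversed(u):
--     step = _DELTA[state].get(ch)
--     if step is None:
--       break
--     state = step[0]
--     depth += 1
--     if step[1]:
--       cut = depth
--   return u[:len(u)-cut]
-- ===== Notes on version B (the rewrite author's own statement) =====
-- stated objective: alternative
-- what changed: A scans a tuple of seven candidate suffixes with endswith until the first match and slices it off; B runs a table-driven automaton (the trie of the reversed suffixes, a state->char transition dict) over the reversed uppercased name, records the deepest accepting depth, and cuts that many characters.
import Mathlib
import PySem

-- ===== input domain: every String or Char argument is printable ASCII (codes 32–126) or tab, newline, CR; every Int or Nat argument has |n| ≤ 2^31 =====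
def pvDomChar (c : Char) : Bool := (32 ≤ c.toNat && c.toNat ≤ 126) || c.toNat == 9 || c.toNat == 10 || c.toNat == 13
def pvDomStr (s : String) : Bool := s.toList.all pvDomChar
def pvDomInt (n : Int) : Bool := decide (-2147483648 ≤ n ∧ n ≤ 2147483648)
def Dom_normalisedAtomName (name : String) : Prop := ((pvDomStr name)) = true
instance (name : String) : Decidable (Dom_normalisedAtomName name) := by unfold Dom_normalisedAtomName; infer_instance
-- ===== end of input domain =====

-- B replaces A's scan over a suffix tuple by a table-driven automaton over the
-- reversed characters (the trie of reversed suffixes) recording the deepest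
-- accepting depth (objective: alternative).

-- ===== PORT A =====
-- A's `for ss in stripSuffixes: if result.endswith(ss): result = result[:-len(ss)]; break`
def pvStripLoop (result : String) : List String → String
  | [] => result
  | ss :: rest =>
    if PySem.Str.endswith result ss then
      PySem.Str.slice result none (some (-(PySem.Str.len ss)))
    else pvStripLoop result rest

def normalisedAtomName (name : String) : String :=
  pvStripLoop (PySem.Str.upper name) ["I+1", "I-1", "+1", "-1", "+", "-", "I"]

-- ===== PORT B =====
-- Source B's _DELTA table: state -> char -> (next state, accepting)
def pvDelta (state : Nat) (ch : Char) : Option (Nat × Bool) :=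
  if state = 0 then
    if ch = '+' then some (1, true)
    else if ch = '-' then some (1, true)
    else if ch = 'I' then some (1, true)
    else if ch = '1' then some (2, false)
    else none
  else if state = 2 then
    if ch = '+' then some (3, true)
    else if ch = '-' then some (3, true)
    else none
  else if state = 3 then
    if ch = 'I' then some (4, true)
    else none
  else none

-- Source B's `for ch in reversed(u): …` with `break` as early return of cut
def pvRun : List Char → Nat → Nat → Nat → Nat
  | [], _, _, cut => cut
  | ch :: rest, state, depth, cut =>
    match pvDelta state ch with
    | none => cut
    | some (s', acc) => pvRun rest s' (depth + 1) (if acc then depth + 1 else cut)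

def normalisedAtomName_alt (name : String) : String :=
  let u := PySem.Str.upper name
  let cut := pvRun u.toList.reverse 0 0 0
  PySem.Str.slice u none (some (PySem.Str.len u - (cut : Int)))

-- ===== PRECONDITION & SPEC =====
def Spec_normalisedAtomName (name : String) (out : String) : Prop := out = normalisedAtomName_alt name
instance (name : String) (out : String) : Decidable (Spec_normalisedAtomName name out) := by unfold Spec_normalisedAtomName; infer_instance

-- ===== CLAIM (what is proved, stated in full; the proofs are below) =====
def Claim_equal_normalisedAtomName : Prop := ∀ (name : String), Dom_normalisedAtomName name → Spec_normalisedAtomName name (normalisedAtomName name)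

-- ===== LEMMAS AND PROOFS =====

-- endswith on a reversed list is a prefix test on the original
theorem pvEnds (r p : List Char) :
    PySem.Chars.endswith r.reverse p = decide (p.reverse <+: r) := by
  simp only [PySem.Chars.endswith, List.isSuffixOf]
  rw [show r = r.reverse.reverse by simp]
  simp only [List.reverse_reverse]
  by_cases hp : p.reverse <+: r
  · simp [List.isPrefixOf_iff_prefix, hp]
  · simp [hp]
    exact Bool.eq_false_iff.mpr (fun h => hp (List.isPrefixOf_iff_prefix.mp h))

-- the automaton's dead state 4 returns the recorded cut
theorem pvRun_dead4 (rest : List Char) (d c : Nat) : pvRun rest 4 d c = c := by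
  cases rest <;> simp [pvRun, pvDelta]

-- the cut computed by B's automaton, as the if-chain over A's suffixes
set_option maxRecDepth 4096 in
theorem pvRun_eq_cases (r : List Char) :
    pvRun r 0 0 0 =
      (if PySem.Chars.endswith r.reverse ['I','+','1'] then 3
       else if PySem.Chars.endswith r.reverse ['I','-','1'] then 3
       else if PySem.Chars.endswith r.reverse ['+','1'] then 2
       else if PySem.Chars.endswith r.reverse ['-','1'] then 2
       else if PySem.Chars.endswith r.reverse ['+'] then 1
       else if PySem.Chars.endswith r.reverse ['-'] then 1
       else if PySem.Chars.endswith r.reverse ['I'] then 1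
       else 0) := by
  simp only [pvEnds]
  rcases r with _ | ⟨x, _ | ⟨y, _ | ⟨z, rest⟩⟩⟩
  · simp [pvRun]
  · by_cases hx1 : x = '+' <;> by_cases hx2 : x = '-' <;> by_cases hx3 : x = 'I' <;>
      by_cases hx4 : x = '1' <;> simp_all [pvRun, pvDelta, List.cons_prefix_cons, @eq_comm Char]
  · by_cases hx1 : x = '+' <;> by_cases hx2 : x = '-' <;> by_cases hx3 : x = 'I' <;>
      by_cases hx4 : x = '1' <;> by_cases hy1 : y = '+' <;> by_cases hy2 : y = '-' <;>
      simp_all [pvRun, pvDelta, List.cons_prefix_cons, @eq_comm Char]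
  · by_cases hx1 : x = '+' <;> by_cases hx2 : x = '-' <;> by_cases hx3 : x = 'I' <;>
      by_cases hx4 : x = '1' <;> by_cases hy1 : y = '+' <;> by_cases hy2 : y = '-' <;>
      by_cases hz : z = 'I' <;> simp_all [pvRun, pvDelta, pvRun_dead4, List.cons_prefix_cons, @eq_comm Char]

-- xs[:-k] equals xs[:len(xs)-k] once the suffix of length k is known to fit
theorem pvSliceEq (l : List Char) (k : Nat) (hk : 0 < k) (hlen : k ≤ l.length) :
    PySem.List.slice l none (some (-(k : Int))) =
      PySem.List.slice l none (some ((l.length : Int) - (k : Int))) := by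
  rw [PySem.List.slice_to_neg_natCast l k hk,
      show ((l.length : Int) - (k : Int)) = ((l.length - k : Nat) : Int) by omega,
      PySem.List.slice_to l (by positivity)]
  simp

-- endswith gives the length bound needed by pvSliceEq
theorem pvEndsLen (l p : List Char) (h : PySem.Chars.endswith l p = true) :
    p.length ≤ l.length :=
  ((PySem.Chars.endswith_iff l p).mp h).length_le

-- ===== VERDICT (by name: the statement is the Claim_ definition above) =====
theorem normalisedAtomName_spec : Claim_equal_normalisedAtomName := by
  intro name _
  show normalisedAtomName name = normalisedAtomName_alt name
  simp only [normalisedAtomName, normalisedAtomName_alt]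
  set u := PySem.Str.upper name with hu
  set l := u.toList with hl
  rw [pvRun_eq_cases l.reverse]
  have hlit1 : ("I+1" : String).toList = ['I','+','1'] := by rfl
  have hlit2 : ("I-1" : String).toList = ['I','-','1'] := by rfl
  have hlit3 : ("+1" : String).toList = ['+','1'] := by rfl
  have hlit4 : ("-1" : String).toList = ['-','1'] := by rfl
  have hlit5 : ("+" : String).toList = ['+'] := by rfl
  have hlit6 : ("-" : String).toList = ['-'] := by rfl
  have hlit7 : ("I" : String).toList = ['I'] := by rfl
  simp only [pvStripLoop, PySem.Str.endswith_eq, PySem.Str.len_eq, PySem.Str.slice,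
    PySem.Chars.slice, hlit1, hlit2, hlit3, hlit4, hlit5, hlit6, hlit7,
    List.reverse_reverse, ← hl, List.length_cons, List.length_nil]
  split_ifs with h1 h2 h3 h4 h5 h6 h7
  · refine congrArg String.ofList ?_
    rw [show ((0:Nat)+1+1+1) = 3 from rfl]
    exact pvSliceEq l 3 (by norm_num) (by simpa using pvEndsLen l _ h1)
  · refine congrArg String.ofList ?_
    rw [show ((0:Nat)+1+1+1) = 3 from rfl]
    exact pvSliceEq l 3 (by norm_num) (by simpa using pvEndsLen l _ h2)
  · refine congrArg String.ofList ?_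
    rw [show ((0:Nat)+1+1) = 2 from rfl]
    exact pvSliceEq l 2 (by norm_num) (by simpa using pvEndsLen l _ h3)
  · refine congrArg String.ofList ?_
    rw [show ((0:Nat)+1+1) = 2 from rfl]
    exact pvSliceEq l 2 (by norm_num) (by simpa using pvEndsLen l _ h4)
  · refine congrArg String.ofList ?_
    rw [show ((0:Nat)+1) = 1 from rfl]
    exact pvSliceEq l 1 (by norm_num) (by simpa using pvEndsLen l _ h5)
  · refine congrArg String.ofList ?_
    rw [show ((0:Nat)+1) = 1 from rfl]
    exact pvSliceEq l 1 (by norm_num) (by simpa using pvEndsLen l _ h6)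
  · refine congrArg String.ofList ?_
    rw [show ((0:Nat)+1) = 1 from rfl]
    exact pvSliceEq l 1 (by norm_num) (by simpa using pvEndsLen l _ h7)
  · rw [show ((l.length : Int) - ((0:Nat) : Int)) = ((l.length : Nat) : Int) by norm_num,
        PySem.List.slice_to l (by positivity), Int.toNat_natCast, List.take_length]
    simp [hl]
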